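-- pv_equiv track=rewrite | github.com/xsjmonk/agent-long-term-memory | agent_embedding_builder/app/config_jsonc_preprocessor.py | _read_standard_string_end
-- ===== SOURCE A (Python) =====
-- def _read_standard_string_end(text: str, start: int) -> int:
--     escaped = False
--     i = start + 1
--     while i < len(text):
--         ch = text[i]
--         if escaped:
--             escaped = False
--         elif ch == "\\":
--             escaped = True
--         elif ch == '"':
--             return i
--         i += 1
--     raise ValueError("Unterminated string in operator config")
-- ===== SOURCE B (Python) =====
-- def _read_standard_string_end(text: str, start: int) -> int:
--     # Jump from quote to quote with str.find, then decide each candidate by the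
--     # parity of the backslash run immediately before it (even run = unescaped).
--     i = start + 1
--     while True:
--         j = text.find('"', i)
--         if j == -1:
--             raise ValueError("Unterminated string in operator config")
--         k = j
--         while k > i and text[k - 1] == "\\":
--             k -= 1
--         if (j - k) % 2 == 0:
--             return j
--         i = j + 1
-- ===== Notes on version B (the rewrite author's own statement) =====
-- stated objective: alternative
-- what changed: Instead of A's uniform character-by-character scan with an escape flag, B jumps directly between quote candidates with str.find and classifies each by the parity of the backslash run immediately before it; Pre_ additionally excludes start+1 < 0, where A's negative-index wraparound scans the tail and then the head of the string while B's find-based scan raises or returns a non-wrapped index.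
-- outside the precondition, e.g. on _read_standard_string_end('ab"', -4): A returns -1, B returns 2; on _read_standard_string_end('"abc', -2): A returns 0, B raises ValueError
import Mathlib
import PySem

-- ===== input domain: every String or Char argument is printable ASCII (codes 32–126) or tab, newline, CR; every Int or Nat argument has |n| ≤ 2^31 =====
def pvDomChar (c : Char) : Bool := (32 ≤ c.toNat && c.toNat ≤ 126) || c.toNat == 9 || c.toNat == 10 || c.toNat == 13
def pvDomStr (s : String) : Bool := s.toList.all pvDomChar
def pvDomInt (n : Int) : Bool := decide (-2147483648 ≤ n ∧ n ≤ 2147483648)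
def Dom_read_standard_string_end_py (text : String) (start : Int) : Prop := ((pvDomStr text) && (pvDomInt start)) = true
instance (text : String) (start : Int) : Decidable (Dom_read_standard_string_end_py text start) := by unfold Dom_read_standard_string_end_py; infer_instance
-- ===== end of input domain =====

-- B replaces A's uniform character scan with an escape flag by a quote-to-quote jump:
-- str.find locates each '"' candidate and the parity of the backslash run just before
-- it decides escapedness; objective: alternative (same asymptotic cost).
-- Both Pythons raise on the same inputs inside the stated domain (ValueError on an
-- unterminated string); those inputs are excluded by Pre_ and the ports return -1 there.

-- ===== PORT A =====
-- loop of A: state = (escaped, i); Python indexing wraps a negative index, hence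
-- PySem.List.pyGet? (none = IndexError, excluded by Pre_); fuel = number of remaining
-- iterations, only to make the recursion structural.
def pvGoA (cs : List Char) (escaped : Bool) (i : Int) (fuel : Nat) : Int :=
  match fuel with
  | 0 => -1
  | Nat.succ f =>
    if i < (cs.length : Int) then
      match PySem.List.pyGet? cs i with
      | none => -1   -- Python raises IndexError here; excluded by Pre_
      | some ch =>
        if escaped then pvGoA cs false (i+1) f
        else if ch = '\\' then pvGoA cs true (i+1) f
        else if ch = '"' then i
        else pvGoA cs escaped (i+1) f
    else -1          -- Python raises ValueError here; excluded by Pre_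

def read_standard_string_end_py (text : String) (start : Int) : Int :=
  pvGoA text.toList false (start + 1) ((text.toList.length : Int) - (start + 1)).toNat

-- ===== PORT B =====
-- text.find('"', i) is PySem.Chars.findFrom (Python-exact, including clamping).
-- inner while of B: k walks back over the backslash run (the ' ' default of getD is
-- never read inside Pre_, where 0 ≤ i < k ≤ j < len keeps k-1 in range); fuel =
-- number of remaining iterations, only to make the recursion structural.
def pvBack (cs : List Char) (i : Int) (k : Int) (fuel : Nat) : Int :=
  match fuel with
  | 0 => k
  | Nat.succ f =>
    if i < k ∧ (PySem.List.pyGet? cs (k-1)).getD ' ' = '\\' then pvBack cs i (k-1) f else k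

-- outer while of B: jump to the next quote candidate, test the run parity.
def pvGoB (cs : List Char) (i : Int) (fuel : Nat) : Int :=
  match fuel with
  | 0 => -1
  | Nat.succ f =>
    let j := PySem.Chars.findFrom cs ['"'] i
    if j = -1 then -1   -- Python raises ValueError here; excluded by Pre_
    else
      if PySem.Int.mod (j - pvBack cs i j (j - i).toNat) 2 = 0 then j
      else pvGoB cs (j+1) f

def read_standard_string_end_py_alt (text : String) (start : Int) : Int :=
  pvGoB text.toList (start + 1) (text.toList.length + 1)

-- ===== PRECONDITION & SPEC =====
-- length of the backslash run immediately before position j of seq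
def pvRunLen (seq : List Char) (j : Nat) : Nat :=
  ((List.range j).takeWhile (fun t => seq.getD (j - 1 - t) ' ' == '\\')).length

-- Pre_ excludes (besides the inputs where A raises) the inputs with start+1 < 0, on
-- which A's negative-index wraparound scans the tail and then the head of the string —
-- outside the natural domain (start is a quote position); B does the natural thing there.
-- Inside start+1 ≥ 0, Pre_ holds exactly when A returns: some scanned '"' is preceded
-- by an even backslash run (otherwise A raises ValueError).
def Pre_read_standard_string_end_py (text : String) (start : Int) : Prop :=
  0 ≤ start + 1 ∧
  ((List.range (text.toList.drop (start+1).toNat).length).any (fun j =>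
      (text.toList.drop (start+1).toNat).getD j ' ' == '"'
        && decide (pvRunLen (text.toList.drop (start+1).toNat) j % 2 = 0))) = true
instance (text : String) (start : Int) : Decidable (Pre_read_standard_string_end_py text start) := by
  unfold Pre_read_standard_string_end_py; infer_instance

def pvWitness_read_standard_string_end_py : String × Int := ("\"a\\\"b\"", 0)

def Spec_read_standard_string_end_py (text : String) (start : Int) (out : Int) : Prop := out = read_standard_string_end_py_alt text start
instance (text : String) (start : Int) (out : Int) : Decidable (Spec_read_standard_string_end_py text start out) := by unfold Spec_read_standard_string_end_py; infer_instance

-- ===== CLAIM (what is proved, stated in full; the proofs are below) =====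
def Claim_equal_read_standard_string_end_py : Prop := ∀ (text : String) (start : Int), Dom_read_standard_string_end_py text start → Pre_read_standard_string_end_py text start → Spec_read_standard_string_end_py text start (read_standard_string_end_py text start)

-- ===== LEMMAS AND PROOFS =====

-- Well-founded models of the two loops (proof-side: the fuel arguments disappear,
-- which keeps the induction proofs below clean; transfer lemmas relate them to the ports).
-- loop of A: state = (escaped, i); Python indexing wraps a negative index, hence
-- PySem.List.pyGet? (none = IndexError, excluded by Pre_).
def pvGoAW (cs : List Char) (escaped : Bool) (i : Int) : Int :=
  if h : i < (cs.length : Int) then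
    match PySem.List.pyGet? cs i with
    | none => -1   -- Python raises IndexError here; excluded by Pre_
    | some ch =>
      if escaped then pvGoAW cs false (i+1)
      else if ch = '\\' then pvGoAW cs true (i+1)
      else if ch = '"' then i
      else pvGoAW cs escaped (i+1)
  else -1          -- Python raises ValueError here; excluded by Pre_
termination_by ((cs.length : Int) - i).toNat
decreasing_by all_goals omega

-- text.find('"', i) is PySem.Chars.findFrom (Python-exact, including clamping).
-- This bounds lemma is cited by pvGoBW's decreasing_by, so it stays above the port.
theorem pvFindAux (cs : List Char) (X : Nat) (hX : X ≤ cs.length) :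
    -1 ≤ PySem.Chars.find (List.drop X (List.take ((cs.length : Int)).toNat cs)) ['"'] ∧
    PySem.Chars.find (List.drop X (List.take ((cs.length : Int)).toNat cs)) ['"'] ≤ (cs.length : Int) - X := by
  refine ⟨PySem.Chars.neg_one_le_find _ _, ?_⟩
  have hl := PySem.Chars.find_le_length (List.drop X (List.take ((cs.length : Int)).toNat cs)) ['"']
  have hlen : (List.drop X (List.take ((cs.length : Int)).toNat cs)).length
      = min ((cs.length : Int)).toNat cs.length - X := by
    simp [List.length_drop]
  rw [hlen] at hl
  omega

theorem pvFind_bounds (cs : List Char) (i : Int)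
    (h : PySem.Chars.findFrom cs ['"'] i ≠ -1) :
    0 ≤ PySem.Chars.findFrom cs ['"'] i ∧
      PySem.Chars.findFrom cs ['"'] i ≤ (cs.length : Int) ∧
      i ≤ (cs.length : Int) ∧
      (0 ≤ i → i ≤ PySem.Chars.findFrom cs ['"'] i) := by
  unfold PySem.Chars.findFrom at *
  simp only at *
  split_ifs at * with h1 h2 h3 h4 h5
  all_goals try exact absurd rfl h
  · have key := pvFindAux cs (Int.toNat 0) (by omega)
    omega
  · have key := pvFindAux cs (i + (cs.length : Int)).toNat (by omega)
    omega
  · have key := pvFindAux cs i.toNat (by omega)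
    omega

-- inner while of B: k walks back over the backslash run (the ' ' default of getD is
-- never read inside Pre_, where 0 ≤ i < k ≤ j < len keeps k-1 in range).
def pvBackW (cs : List Char) (i : Int) (k : Int) : Int :=
  if h : i < k ∧ (PySem.List.pyGet? cs (k-1)).getD ' ' = '\\' then pvBackW cs i (k-1) else k
termination_by (k - i).toNat
decreasing_by all_goals omega

-- outer while of B: jump to the next quote candidate, test the run parity.
def pvGoBW (cs : List Char) (i : Int) : Int :=
  let j := PySem.Chars.findFrom cs ['"'] i
  if h : j = -1 then -1   -- Python raises ValueError here; excluded by Pre_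
  else
    if PySem.Int.mod (j - pvBackW cs i j) 2 = 0 then j
    else pvGoBW cs (j+1)
termination_by ((cs.length : Int) + 1 - i).toNat
decreasing_by
  have hb := pvFind_bounds cs i h
  omega


-- escape automaton of A run over positions [i, j) (proof-side helper)
def pvEsc (cs : List Char) (e : Bool) (i j : Nat) : Bool :=
  if i < j then pvEsc cs (if e then false else decide (cs.getD i ' ' = '\\')) (i+1) j else e
termination_by j - i

-- a singleton list is a prefix of a drop iff that position holds the character
theorem pvQuotePrefix (cs : List Char) (m : Nat) (c : Char) :
    [c] <+: cs.drop m ↔ cs[m]? = some c := by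
  have h0 : (cs.drop m)[0]? = cs[m]? := by
    rw [List.getElem?_drop, Nat.add_zero]
  cases h : cs.drop m with
  | nil => rw [← h0, h]; simp
  | cons a t => rw [← h0, h]; simp [List.cons_prefix_cons, eq_comm]

-- unfolding pvEsc from the right
theorem pvEsc_succ_right (cs : List Char) (e : Bool) (i j : Nat) (h : i ≤ j) :
    pvEsc cs e i (j+1) =
      (if pvEsc cs e i j then false else decide (cs.getD j ' ' = '\\')) := by
  obtain ⟨n, rfl⟩ : ∃ n, j = i + n := ⟨j - i, by omega⟩
  clear h
  induction n generalizing i e with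
  | zero =>
    simp only [Nat.add_zero]
    rw [pvEsc, if_pos (Nat.lt_succ_self i), pvEsc, if_neg (lt_irrefl (i+1)),
      pvEsc, if_neg (lt_irrefl i)]
  | succ n ih =>
    have harr : i + (n+1) = (i+1) + n := by omega
    rw [harr]
    rw [pvEsc, if_pos (by omega)]
    rw [ih]
    have hR : pvEsc cs e i (i+1+n) =
        pvEsc cs (if e then false else decide (cs.getD i ' ' = '\\')) (i+1) (i+1+n) := by
      rw [pvEsc, if_pos (by omega)]
    rw [hR]

theorem pvBackW_bounds (cs : List Char) (i k : Int) (h : i ≤ k) :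
    i ≤ pvBackW cs i k ∧ pvBackW cs i k ≤ k := by
  obtain ⟨n, hn⟩ : ∃ n : Nat, k = i + n := ⟨(k - i).toNat, by omega⟩
  induction n generalizing k with
  | zero => rw [pvBackW, dif_neg (by omega)]; omega
  | succ n ih =>
    rw [pvBackW]
    split_ifs with hc
    · have := ih (k - 1) (by omega) (by omega)
      omega
    · omega

-- the escape state at j equals the parity of the backslash run before j
theorem pvGetBridge (cs : List Char) (m : Int) (h : 0 ≤ m) :
    (PySem.List.pyGet? cs m).getD ' ' = cs.getD m.toNat ' ' := by
  rw [PySem.List.pyGet?_of_nonneg cs h, List.getD_eq_getElem?_getD]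

theorem pvEsc_parity (cs : List Char) (i j : Int) (h0 : 0 ≤ i) (hij : i ≤ j)
    (hj : j ≤ (cs.length : Int)) :
    pvEsc cs false i.toNat j.toNat = decide (¬ (2 ∣ (j - pvBackW cs i j))) := by
  obtain ⟨d, rfl⟩ : ∃ d : Nat, j = i + d := ⟨(j - i).toNat, by omega⟩
  induction d with
  | zero =>
    rw [pvEsc, if_neg (by omega), pvBackW, dif_neg (by omega)]
    simp
  | succ d ih =>
    have hback := pvBackW_bounds cs i (i + d) (by omega)
    simp only [Nat.cast_add, Nat.cast_one] at *
    have htn : (i + ((d:Int) + 1)).toNat = (i + d).toNat + 1 := by omega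
    rw [htn, pvEsc_succ_right cs false i.toNat ((i+d).toNat) (by omega)]
    rw [ih (by omega) (by omega)]
    have hstep : pvBackW cs i (i + ((d:Int) + 1)) =
        (if i < i + ((d:Int)+1) ∧ (PySem.List.pyGet? cs ((i + ((d:Int)+1)) - 1)).getD ' ' = '\\'
         then pvBackW cs i ((i + ((d:Int)+1)) - 1) else i + ((d:Int)+1)) := by
      rw [pvBackW]; simp
    have hidx : (i + ((d:Int)+1)) - 1 = i + (d:Int) := by ring
    rw [hstep, hidx]
    have hbridge : (PySem.List.pyGet? cs (i + (d:Int))).getD ' ' = cs.getD ((i + (d:Int)).toNat) ' ' :=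
      pvGetBridge cs _ (by omega)
    by_cases hch : cs.getD ((i + (d:Int)).toNat) ' ' = '\\'
    · have hch' : cs[(i + (d:Int)).toNat]?.getD ' ' = '\\' := by
        rw [← List.getD_eq_getElem?_getD]; exact hch
      rw [if_pos (And.intro (by omega) (by rw [hbridge]; exact hch))]
      by_cases h2 : (2:Int) ∣ (i + (d:Int) - pvBackW cs i (i + (d:Int)))
      · have h3 : ¬ (2:Int) ∣ (i + ((d:Int)+1) - pvBackW cs i (i + (d:Int))) := by omega
        simp [h2, h3, hch']
      · have h3 : (2:Int) ∣ (i + ((d:Int)+1) - pvBackW cs i (i + (d:Int))) := by omega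
        simp [h2, h3]
    · have hch' : ¬ (cs[(i + (d:Int)).toNat]?.getD ' ' = '\\') := by
        rw [← List.getD_eq_getElem?_getD]; exact hch
      have hcond : ¬ (i < i + ((d:Int)+1) ∧ (PySem.List.pyGet? cs (i + (d:Int))).getD ' ' = '\\') :=
        fun hh => hch (hbridge ▸ hh.2)
      rw [if_neg hcond]
      simp [hch']


-- A's scan from i up to the first quote at j
theorem pvGoAW_to_quote (cs : List Char) (e : Bool) (i j : Int) (h0 : 0 ≤ i) (hij : i ≤ j)
    (hq : cs[j.toNat]? = some '"')
    (hnq : ∀ t : Nat, i ≤ (t:Int) → (t:Int) < j → cs[t]? ≠ some '"') :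
    pvGoAW cs e i = if pvEsc cs e i.toNat j.toNat then pvGoAW cs false (j+1) else j := by
  have hjlen : j < (cs.length : Int) := by
    have := (List.getElem?_eq_some_iff.mp hq).1
    omega
  obtain ⟨d, rfl⟩ : ∃ d : Nat, j = i + d := ⟨(j - i).toNat, by omega⟩
  induction d generalizing i e with
  | zero =>
    simp only [Nat.cast_zero, add_zero] at *
    rw [pvGoAW, dif_pos (by omega)]
    rw [PySem.List.pyGet?_of_nonneg cs h0, hq]
    rw [pvEsc, if_neg (lt_irrefl _)]
    cases e with
    | true => simp
    | false => simp
  | succ d ih =>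
    simp only [Nat.cast_add, Nat.cast_one] at *
    have harr : i + ((d:Int)+1) = (i+1) + d := by ring
    rw [harr] at hq hjlen ⊢
    obtain ⟨c, hc⟩ : ∃ c, cs[i.toNat]? = some c :=
      ⟨_, List.getElem?_eq_some_iff.mpr ⟨by omega, rfl⟩⟩
    have hcq : c ≠ '"' := by
      intro hcc
      exact hnq i.toNat (by omega) (by omega) (by rw [hc, hcc])
    have hgetd : cs.getD i.toNat ' ' = c := by
      rw [List.getD_eq_getElem?_getD, hc]; rfl
    have ih' := fun (e' : Bool) => ih e' (i+1) (by omega) (by omega) hq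
      (fun t ht1 ht2 => hnq t (by omega) (by omega)) hjlen
    have hE : pvEsc cs e i.toNat ((i+1) + (d:Int)).toNat =
        pvEsc cs (if e then false else decide (c = '\\')) ((i+1:Int)).toNat ((i+1) + (d:Int)).toNat := by
      rw [pvEsc, if_pos (by omega), hgetd,
        show i.toNat + 1 = ((i+1:Int)).toNat by omega]
    rw [pvGoAW, dif_pos (by omega)]
    rw [PySem.List.pyGet?_of_nonneg cs h0, hc]
    cases e with
    | true =>
      simp only [if_true] at hE ⊢
      rw [hE]
      exact ih' false
    | false =>
      simp only [Bool.false_eq_true, if_false] at hE ⊢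
      rw [hE]
      by_cases hbs : c = '\\'
      · have hdec : decide (c = '\\') = true := by simp [hbs]
        rw [if_pos hbs, hdec]
        exact ih' true
      · have hdec : decide (c = '\\') = false := by simp [hbs]
        rw [if_neg hbs, if_neg hcq, hdec]
        exact ih' false


-- A's scan with no quote ahead runs off the end
theorem pvGoAW_no_quote (cs : List Char) (e : Bool) (i : Int) (h0 : 0 ≤ i)
    (hnq : ∀ t : Nat, i ≤ (t:Int) → cs[t]? ≠ some '"') :
    pvGoAW cs e i = -1 := by
  obtain ⟨n, hn⟩ : ∃ n : Nat, (cs.length : Int) - i ≤ n := ⟨((cs.length : Int) - i).toNat, by omega⟩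
  induction n generalizing i e with
  | zero => rw [pvGoAW, dif_neg (by omega)]
  | succ n ih =>
    by_cases hlt : i < (cs.length : Int)
    · obtain ⟨c, hc⟩ : ∃ c, cs[i.toNat]? = some c :=
        ⟨_, List.getElem?_eq_some_iff.mpr ⟨by omega, rfl⟩⟩
      have hcq : c ≠ '"' := fun hcc => hnq i.toNat (by omega) (by rw [hc, hcc])
      rw [pvGoAW, dif_pos hlt, PySem.List.pyGet?_of_nonneg cs h0, hc]
      have ih' := fun (e' : Bool) => ih e' (i+1) (by omega)
        (fun t ht => hnq t (by omega)) (by omega)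
      cases e with
      | true => simp only [if_true]; exact ih' false
      | false =>
        simp only [Bool.false_eq_true, if_false]
        by_cases hbs : c = '\\'
        · rw [if_pos hbs]; exact ih' true
        · rw [if_neg hbs, if_neg hcq]; exact ih' false
    · rw [pvGoAW, dif_neg hlt]


-- the two loops agree from any nonnegative index
theorem pvGo_eq (cs : List Char) (i : Int) (h0 : 0 ≤ i) :
    pvGoAW cs false i = pvGoBW cs i := by
  obtain ⟨n, hn⟩ : ∃ n : Nat, (cs.length : Int) + 1 - i ≤ n :=
    ⟨((cs.length : Int) + 1 - i).toNat, by omega⟩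
  induction n generalizing i with
  | zero =>
    have hj : PySem.Chars.findFrom cs ['"'] i = -1 := by
      by_contra h
      have := pvFind_bounds cs i h
      omega
    rw [pvGoAW, dif_neg (by omega), pvGoBW]
    simp only [hj, dif_pos]
  | succ n ih =>
    rw [pvGoBW]
    by_cases hj : PySem.Chars.findFrom cs ['"'] i = -1
    · simp only [hj, dif_pos]
      by_cases hil : i ≤ (cs.length : Int)
      · have hcast : ((i.toNat : Nat) : Int) = i := by omega
        have hiff := PySem.Chars.findFrom_natCast_eq_neg_one_iff cs ['"'] i.toNat (by omega)
        rw [hcast] at hiff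
        have hnin : ¬ ['"'] <:+: cs.drop i.toNat := hiff.mp hj
        have hnq : ∀ t : Nat, i ≤ (t:Int) → cs[t]? ≠ some '"' := by
          intro t ht hsome
          apply hnin
          rw [List.singleton_infix_iff]
          have hdt : (cs.drop i.toNat)[t - i.toNat]? = cs[t]? := by
            rw [List.getElem?_drop]; congr 1; omega
          exact List.mem_of_getElem? (by rw [hdt]; exact hsome)
        exact pvGoAW_no_quote cs false i h0 hnq
      · rw [pvGoAW, dif_neg (by omega)]
    · have hb := pvFind_bounds cs i hj
      have hcast : ((i.toNat : Nat) : Int) = i := by omega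
      have hspec := PySem.Chars.findFrom_natCast_spec cs ['"'] i.toNat (by omega)
      rw [hcast] at hspec
      obtain ⟨hij, hpre, hmin⟩ := hspec hj
      have hq : cs[(PySem.Chars.findFrom cs ['"'] i).toNat]? = some '"' :=
        (pvQuotePrefix cs _ '"').mp hpre
      have hnq : ∀ t : Nat, i ≤ (t:Int) → (t:Int) < PySem.Chars.findFrom cs ['"'] i →
          cs[t]? ≠ some '"' := by
        intro t ht1 ht2 hsome
        exact hmin t (by omega) (by omega) ((pvQuotePrefix cs t '"').mpr hsome)
      rw [pvGoAW_to_quote cs false i _ h0 (hb.2.2.2 h0) hq hnq]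
      rw [pvEsc_parity cs i _ h0 (hb.2.2.2 h0) hb.2.1]
      have hmod := PySem.Int.mod_eq_zero_iff_dvd
        (PySem.Chars.findFrom cs ['"'] i - pvBackW cs i (PySem.Chars.findFrom cs ['"'] i)) 2
      by_cases h2 : (2:Int) ∣ (PySem.Chars.findFrom cs ['"'] i - pvBackW cs i (PySem.Chars.findFrom cs ['"'] i))
      · have hLd : (decide (¬ (2:Int) ∣ (PySem.Chars.findFrom cs ['"'] i - pvBackW cs i (PySem.Chars.findFrom cs ['"'] i)))) = false := by
          simp [h2]
        rw [hLd]
        simp only [Bool.false_eq_true, if_false]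
        rw [if_pos (hmod.mpr h2)]
        rw [dif_neg hj]
      · have hLd : (decide (¬ (2:Int) ∣ (PySem.Chars.findFrom cs ['"'] i - pvBackW cs i (PySem.Chars.findFrom cs ['"'] i)))) = true := by
          simpa using h2
        rw [hLd]
        simp only [if_true]
        rw [if_neg (fun hmm => h2 (hmod.mp hmm))]
        rw [dif_neg hj]
        exact ih (PySem.Chars.findFrom cs ['"'] i + 1) (by omega) (by omega)

-- with enough fuel the fuel-based port computes its well-founded model
theorem pvGoA_eq_W (cs : List Char) : ∀ (f : Nat) (e : Bool) (i : Int),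
    ((cs.length : Int) - i).toNat ≤ f → pvGoA cs e i f = pvGoAW cs e i := by
  intro f
  induction f with
  | zero =>
    intro e i hf
    rw [pvGoAW, dif_neg (by omega)]
    rfl
  | succ f ih =>
    intro e i hf
    by_cases hlt : i < (cs.length : Int)
    · rw [pvGoAW, dif_pos hlt]
      show (if i < (cs.length : Int) then _ else _) = _
      rw [if_pos hlt]
      cases hg : PySem.List.pyGet? cs i with
      | none => rfl
      | some c =>
        simp only []
        split_ifs <;> first | rfl | (exact ih _ _ (by omega))
    · rw [pvGoAW, dif_neg hlt]
      show (if i < (cs.length : Int) then _ else _) = _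
      rw [if_neg hlt]

theorem pvBack_eq_W (cs : List Char) : ∀ (f : Nat) (i k : Int),
    (k - i).toNat ≤ f → pvBack cs i k f = pvBackW cs i k := by
  intro f
  induction f with
  | zero =>
    intro i k hf
    rw [pvBackW, dif_neg (by omega)]
    rfl
  | succ f ih =>
    intro i k hf
    rw [pvBackW]
    show (if i < k ∧ _ then _ else _) = _
    split_ifs with hc
    · exact ih i (k-1) (by omega)
    · rfl

theorem pvGoB_eq_W (cs : List Char) : ∀ (f : Nat) (i : Int), 0 ≤ i →
    ((cs.length : Int) + 1 - i).toNat ≤ f → pvGoB cs i f = pvGoBW cs i := by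
  intro f
  induction f with
  | zero =>
    intro i h0 hf
    have hj : PySem.Chars.findFrom cs ['"'] i = -1 := by
      by_contra h
      have := pvFind_bounds cs i h
      omega
    rw [pvGoBW]
    simp only [hj, dif_pos]
    rfl
  | succ f ih =>
    intro i h0 hf
    rw [pvGoBW]
    show (let j := PySem.Chars.findFrom cs ['"'] i; if j = -1 then _ else _) = _
    by_cases hj : PySem.Chars.findFrom cs ['"'] i = -1
    · simp only [hj, if_pos, dif_pos]
    · have hb := pvFind_bounds cs i hj
      simp only [hj, if_neg, dif_neg, not_false_iff]
      rw [pvBack_eq_W cs _ i _ (le_refl _)]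
      split_ifs with hm
      · rfl
      · exact ih _ (by omega) (by omega)

-- ===== VERDICT (by name: the statement is the Claim_ definition above) =====
theorem read_standard_string_end_py_spec : Claim_equal_read_standard_string_end_py := by
  intro text start _ hpre
  unfold Spec_read_standard_string_end_py read_standard_string_end_py read_standard_string_end_py_alt
  rw [pvGoA_eq_W text.toList _ false (start+1) (le_refl _)]
  rw [pvGoB_eq_W text.toList _ (start+1) hpre.1 (by have := hpre.1; omega)]
  exact pvGo_eq text.toList (start + 1) hpre.1
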